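-- pv_equiv track=rewrite | github.com/wfxronald/chartasis | result_processor.py | get_straight_red_twist
-- ===== SOURCE A (Python) =====
-- def get_straight_red_twist(array):
-- 	count = 0
-- 	prev_prev_row = ""
-- 	prev_row = ""
-- 	for row in array:
-- 		if len(row) not in [5, 6, 10]:
-- 			continue
--
-- 		if prev_prev_row != "" and prev_row != "":
-- 			if len(row) == 5:
-- 				if prev_prev_row[1] != '0' and prev_row[2] != '0' and row[3] != '0':
-- 					count += 1
-- 				if prev_prev_row[3] != '0' and prev_row[2] != '0' and row[1] != '0':
-- 					count += 1
--
-- 			if len(row) == 6: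
-- 				if prev_prev_row[0] != '0' and prev_row[1] != '0' and row[4] != '0':
-- 					count += 1
-- 				if prev_prev_row[4] != '0' and prev_row[1] != '0' and row[0] != '0':
-- 					count += 1
-- 				if prev_prev_row[1] != '0' and prev_row[4] != '0' and row[5] != '0':
-- 					count += 1
-- 				if prev_prev_row[5] != '0' and prev_row[4] != '0' and row[1] != '0':
-- 					count += 1
--
-- 			elif len(row) == 10:
-- 				if prev_prev_row[1] != '0' and prev_row[2] != '0' and row[3] != '0':
-- 					count += 1
-- 				if prev_prev_row[3] != '0' and prev_row[2] != '0' and row[1] != '0':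
-- 					count += 1
-- 				if prev_prev_row[6] != '0' and prev_row[7] != '0' and row[8] != '0':
-- 					count += 1
-- 				if prev_prev_row[8] != '0' and prev_row[7] != '0' and row[6] != '0':
-- 					count += 1
--
-- 				if prev_prev_row[2] != '0' and prev_row[3] != '0' and row[6] != '0':
-- 					count += 1
-- 				if prev_prev_row[6] != '0' and prev_row[3] != '0' and row[2] != '0':
-- 					count += 1
-- 				if prev_prev_row[3] != '0' and prev_row[6] != '0' and row[7] != '0':
-- 					count += 1
-- 				if prev_prev_row[7] != '0' and prev_row[6] != '0' and row[3] != '0':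
-- 					count += 1
--
-- 		prev_prev_row = prev_row
-- 		prev_row = row
--
-- 	return count
-- ===== SOURCE B (Python) =====
-- def get_straight_red_twist(array):
--     valid = [r for r in array if len(r) in (5, 6, 10)]
--     PATTERNS = [(5, 1, 2, 3), (5, 3, 2, 1),
--                 (6, 0, 1, 4), (6, 4, 1, 0), (6, 1, 4, 5), (6, 5, 4, 1),
--                 (10, 1, 2, 3), (10, 3, 2, 1), (10, 6, 7, 8), (10, 8, 7, 6),
--                 (10, 2, 3, 6), (10, 6, 3, 2), (10, 3, 6, 7), (10, 7, 6, 3)]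
--     total = 0
--     for L, i, j, k in PATTERNS:
--         for x, y, z in zip(valid, valid[1:], valid[2:]):
--             if len(z) == L and x[i] != '0' and y[j] != '0' and z[k] != '0':
--                 total += 1
--     return total
-- ===== Notes on version B (the rewrite author's own statement) =====
-- stated objective: alternative
-- what changed: Inverts the traversal: instead of A's single stateful sweep carrying prev/prev_prev sentinel strings through 14 inline if-blocks grouped by row length, B filters the valid-length rows once and then makes one separate pass over the row windows for each of the 14 (length,i,j,k) patterns, accumulating the matches pattern by pattern.
import Mathlib
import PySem

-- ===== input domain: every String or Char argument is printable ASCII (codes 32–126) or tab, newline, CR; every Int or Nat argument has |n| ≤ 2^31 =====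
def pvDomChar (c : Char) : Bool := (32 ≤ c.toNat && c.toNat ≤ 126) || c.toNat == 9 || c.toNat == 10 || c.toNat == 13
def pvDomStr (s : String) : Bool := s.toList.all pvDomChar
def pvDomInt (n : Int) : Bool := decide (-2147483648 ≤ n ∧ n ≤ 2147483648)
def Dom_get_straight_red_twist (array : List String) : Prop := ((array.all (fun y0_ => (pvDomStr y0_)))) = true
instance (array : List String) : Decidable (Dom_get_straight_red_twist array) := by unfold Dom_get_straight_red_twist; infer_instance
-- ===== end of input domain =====

-- B inverts the traversal: instead of A's single stateful sweep with prev/prev_prev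
-- sentinels and 14 inline if-blocks, B makes one pass per pattern (pattern-major),
-- scanning the filtered rows for each of the 14 (length,i,j,k) patterns (objective: alternative).

-- ===== PORT A =====
-- s[i] != '0'; inside Pre_ every index actually reached is in range, so getD's default is never used
def pvNZ (s : String) (i : Nat) : Bool := ((PySem.Str.pyGet? s (i : Int)).getD '!') != '0'
-- len(row) in [5, 6, 10]
def pvValid (row : String) : Bool := PySem.Str.len row == 5 || PySem.Str.len row == 6 || PySem.Str.len row == 10

def pvStepA (st : Int × String × String) (row : String) : Int × String × String :=
  let count := st.1
  let pp := st.2.1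
  let p := st.2.2
  if pvValid row = false then st
  else
    let count :=
      if pp ≠ "" ∧ p ≠ "" then
        let count :=
          if PySem.Str.len row = 5 then
            let count := if pvNZ pp 1 && pvNZ p 2 && pvNZ row 3 then count + 1 else count
            if pvNZ pp 3 && pvNZ p 2 && pvNZ row 1 then count + 1 else count
          else count
        if PySem.Str.len row = 6 then
          let count := if pvNZ pp 0 && pvNZ p 1 && pvNZ row 4 then count + 1 else count
          let count := if pvNZ pp 4 && pvNZ p 1 && pvNZ row 0 then count + 1 else count
          let count := if pvNZ pp 1 && pvNZ p 4 && pvNZ row 5 then count + 1 else count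
          if pvNZ pp 5 && pvNZ p 4 && pvNZ row 1 then count + 1 else count
        else if PySem.Str.len row = 10 then
          let count := if pvNZ pp 1 && pvNZ p 2 && pvNZ row 3 then count + 1 else count
          let count := if pvNZ pp 3 && pvNZ p 2 && pvNZ row 1 then count + 1 else count
          let count := if pvNZ pp 6 && pvNZ p 7 && pvNZ row 8 then count + 1 else count
          let count := if pvNZ pp 8 && pvNZ p 7 && pvNZ row 6 then count + 1 else count
          let count := if pvNZ pp 2 && pvNZ p 3 && pvNZ row 6 then count + 1 else count
          let count := if pvNZ pp 6 && pvNZ p 3 && pvNZ row 2 then count + 1 else count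
          let count := if pvNZ pp 3 && pvNZ p 6 && pvNZ row 7 then count + 1 else count
          if pvNZ pp 7 && pvNZ p 6 && pvNZ row 3 then count + 1 else count
        else count
      else count
    (count, p, row)

def get_straight_red_twist (array : List String) : Int :=
  (array.foldl pvStepA (0, "", "")).1

-- ===== PORT B =====
-- the static PATTERNS list of Source B
def pvPatterns : List (Int × Nat × Nat × Nat) :=
  [(5, 1, 2, 3), (5, 3, 2, 1),
   (6, 0, 1, 4), (6, 4, 1, 0), (6, 1, 4, 5), (6, 5, 4, 1),
   (10, 1, 2, 3), (10, 3, 2, 1), (10, 6, 7, 8), (10, 8, 7, 6),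
   (10, 2, 3, 6), (10, 6, 3, 2), (10, 3, 6, 7), (10, 7, 6, 3)]

-- len(z) == L and x[i] != '0' and y[j] != '0' and z[k] != '0'
def pvCondP (p : Int × Nat × Nat × Nat) (x y z : String) : Bool :=
  (PySem.Str.len z == p.1) && pvNZ x p.2.1 && pvNZ y p.2.2.1 && pvNZ z p.2.2.2

def get_straight_red_twist_alt (array : List String) : Int :=
  let valid := array.filter (fun r => pvValid r)
  pvPatterns.foldl
    (fun total p =>
      (List.zip valid (List.zip (valid.drop 1) (valid.drop 2))).foldl
        (fun acc w => if pvCondP p w.1 w.2.1 w.2.2 then acc + 1 else acc) total)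
    0

-- ===== PRECONDITION & SPEC =====
-- the index triples A tests for a third row of the given length
def pvTable (n : Int) : List (Nat × Nat × Nat) :=
  if n = 5 then [(1, 2, 3), (3, 2, 1)]
  else if n = 6 then [(0, 1, 4), (4, 1, 0), (1, 4, 5), (5, 4, 1)]
  else if n = 10 then [(1, 2, 3), (3, 2, 1), (6, 7, 8), (8, 7, 6), (2, 3, 6), (6, 3, 2), (3, 6, 7), (7, 6, 3)]
  else []

-- Pre_ excludes exactly the inputs on which A raises IndexError: in some consecutive
-- triple (x,y,z) of valid-length rows, a tested index falls past the end of x, or past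
-- the end of y without x's non-'0' test short-circuiting first (B raises on those too).
def pvSafe3 (x y z : String) : Bool :=
  (pvTable (PySem.Str.len z)).all (fun t =>
    decide ((t.1 : Int) < PySem.Str.len x) &&
    (!(pvNZ x t.1) || decide ((t.2.1 : Int) < PySem.Str.len y)))

def pvChain3 : List String → Bool
  | x :: y :: z :: r => pvSafe3 x y z && pvChain3 (y :: z :: r)
  | _ => true

def Pre_get_straight_red_twist (array : List String) : Prop :=
  pvChain3 (array.filter (fun r => pvValid r)) = true
instance (array : List String) : Decidable (Pre_get_straight_red_twist array) := by
  unfold Pre_get_straight_red_twist; infer_instance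

def pvWitness_get_straight_red_twist : List String := ["11111", "10111", "11011"]

def Spec_get_straight_red_twist (array : List String) (out : Int) : Prop := out = get_straight_red_twist_alt array
instance (array : List String) (out : Int) : Decidable (Spec_get_straight_red_twist array out) := by unfold Spec_get_straight_red_twist; infer_instance

-- ===== CLAIM (what is proved, stated in full; the proofs are below) =====
def Claim_equal_get_straight_red_twist : Prop := ∀ (array : List String), Dom_get_straight_red_twist array → Pre_get_straight_red_twist array → Spec_get_straight_red_twist array (get_straight_red_twist array)

-- ===== LEMMAS AND PROOFS =====

-- per-triple count of matching patterns, as A effectively computes it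
def pvCnt3 (x y z : String) : Int :=
  (((pvTable (PySem.Str.len z)).countP (fun t => pvNZ x t.1 && pvNZ y t.2.1 && pvNZ z t.2.2) : Nat) : Int)

-- total over all consecutive triples (A's window order)
def pvTri : List String → Int
  | x :: y :: z :: r => pvCnt3 x y z + pvTri (y :: z :: r)
  | _ => 0

theorem addIf (b : Bool) (x : Int) : (if b then x + 1 else x) = x + (if b then 1 else 0) := by
  cases b <;> simp

theorem pvStepA_skip (st : Int × String × String) (row : String)
    (h : pvValid row = false) : pvStepA st row = st := by
  simp [pvStepA, h]

theorem foldl_filter_stepA (l : List String) (st : Int × String × String) :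
    l.foldl pvStepA st = (l.filter (fun r => pvValid r)).foldl pvStepA st := by
  induction l generalizing st with
  | nil => rfl
  | cons x t ih =>
    by_cases h : pvValid x = true
    · simp [h, List.foldl_cons, ih]
    · simp only [Bool.not_eq_true] at h
      simp [h, List.foldl_cons, pvStepA_skip _ _ h, ih]

theorem pvValid_ne_empty (r : String) (h : pvValid r = true) : r ≠ "" := by
  intro he; subst he; simp [pvValid, PySem.Str.len] at h

theorem pvStepA_count (c : Int) (pp p row : String)
    (hv : pvValid row = true) (hpp : pp ≠ "") (hp : p ≠ "") :
    pvStepA (c, pp, p) row = (c + pvCnt3 pp p row, p, row) := by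
  have h5610 : PySem.Str.len row = 5 ∨ PySem.Str.len row = 6 ∨ PySem.Str.len row = 10 := by
    have h2 := hv
    simp only [pvValid, Bool.or_eq_true, beq_iff_eq] at h2
    tauto
  rcases h5610 with h | h | h
  · simp only [pvStepA, pvCnt3, hv, h, hpp, hp, ne_eq, not_false_eq_true, and_self, if_true,
      Bool.true_eq_false, if_false, pvTable, addIf, Prod.mk.injEq, and_true]
    norm_num
    rw [List.countP_cons, List.countP_cons, List.countP_nil]
    push_cast
    simp only [Bool.and_eq_true, and_assoc]
    ring
  · simp only [pvStepA, pvCnt3, hv, h, hpp, hp, ne_eq, not_false_eq_true, and_self, if_true,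
      Bool.true_eq_false, if_false, pvTable, addIf, Prod.mk.injEq, and_true]
    norm_num
    rw [List.countP_cons, List.countP_cons, List.countP_cons, List.countP_cons, List.countP_nil]
    push_cast
    simp only [Bool.and_eq_true, and_assoc]
    ring
  · simp only [pvStepA, pvCnt3, hv, h, hpp, hp, ne_eq, not_false_eq_true, and_self, if_true,
      Bool.true_eq_false, if_false, pvTable, addIf, Prod.mk.injEq, and_true]
    norm_num
    rw [List.countP_cons, List.countP_cons, List.countP_cons, List.countP_cons,
      List.countP_cons, List.countP_cons, List.countP_cons, List.countP_cons, List.countP_nil]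
    push_cast
    simp only [Bool.and_eq_true, and_assoc]
    ring

theorem foldl_stepA_tri (l : List String) (c : Int) (pp p : String)
    (hall : ∀ r ∈ l, pvValid r = true) (hpp : pp ≠ "") (hp : p ≠ "") :
    (l.foldl pvStepA (c, pp, p)).1 = c + pvTri (pp :: p :: l) := by
  induction l generalizing c pp p with
  | nil => simp [pvTri]
  | cons row t ih =>
    have hv : pvValid row = true := hall row (by simp)
    rw [List.foldl_cons, pvStepA_count c pp p row hv hpp hp,
      ih _ _ _ (fun r hr => hall r (by simp [hr])) hp (pvValid_ne_empty row hv)]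
    rw [show pvTri (pp :: p :: row :: t) = pvCnt3 pp p row + pvTri (p :: row :: t) from rfl]
    ring

theorem foldl_stepA_start (l : List String) (c : Int)
    (hall : ∀ r ∈ l, pvValid r = true) :
    (l.foldl pvStepA (c, "", "")).1 = c + pvTri l := by
  match l with
  | [] => simp [pvTri]
  | [x] =>
    have hv := hall x (by simp)
    simp [pvStepA, hv, pvTri]
  | x :: y :: t =>
    have hvx := hall x (by simp)
    have hvy := hall y (by simp)
    rw [List.foldl_cons, List.foldl_cons]
    have s1 : pvStepA (c, "", "") x = (c, "", x) := by simp [pvStepA, hvx]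
    have s2 : pvStepA (c, "", x) y = (c, x, y) := by simp [pvStepA, hvy]
    rw [s1, s2, foldl_stepA_tri t c x y (fun r hr => hall r (by simp [hr]))
      (pvValid_ne_empty x hvx) (pvValid_ne_empty y hvy)]

-- ===== B-side lemmas =====

-- inner zip-fold counts the matching windows for one pattern
theorem foldl_if_count (p : Int × Nat × Nat × Nat)
    (W : List (String × String × String)) (t : Int) :
    W.foldl (fun a w => if pvCondP p w.1 w.2.1 w.2.2 then a + 1 else a) t
      = t + ((W.countP (fun w => pvCondP p w.1 w.2.1 w.2.2) : Nat) : Int) := by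
  induction W generalizing t with
  | nil => simp
  | cons w ws ih =>
    rw [List.foldl_cons, ih, List.countP_cons]
    by_cases h : pvCondP p w.1 w.2.1 w.2.2 = true
    · simp only [h, if_true]
      push_cast
      ring
    · simp only [h]
      push_cast
      ring

-- the outer pattern-fold equals the sum over windows of the per-window pattern count
theorem sum_map_countP_cons (p : Int × Nat × Nat × Nat) (ps : List (Int × Nat × Nat × Nat))
    (W : List (String × String × String)) :
    (W.map (fun w => (((p :: ps).countP (fun q => pvCondP q w.1 w.2.1 w.2.2) : Nat) : Int))).sum
      = ((W.countP (fun w => pvCondP p w.1 w.2.1 w.2.2) : Nat) : Int)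
        + (W.map (fun w => ((ps.countP (fun q => pvCondP q w.1 w.2.1 w.2.2) : Nat) : Int))).sum := by
  induction W with
  | nil => simp
  | cons w ws ih =>
    rw [List.map_cons, List.sum_cons, ih, List.map_cons, List.sum_cons, List.countP_cons, List.countP_cons]
    by_cases h : pvCondP p w.1 w.2.1 w.2.2 = true
    · simp only [h, if_true]
      push_cast
      ring
    · simp only [h]
      push_cast
      ring

theorem foldl_patterns (ps : List (Int × Nat × Nat × Nat))
    (W : List (String × String × String)) (t : Int) :
    ps.foldl
      (fun total p =>
        W.foldl (fun a w => if pvCondP p w.1 w.2.1 w.2.2 then a + 1 else a) total) t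
      = t + (W.map (fun w => ((ps.countP (fun p => pvCondP p w.1 w.2.1 w.2.2) : Nat) : Int))).sum := by
  induction ps generalizing t with
  | nil => simp
  | cons p ps ih =>
    rw [List.foldl_cons, foldl_if_count, ih, sum_map_countP_cons]
    ring

-- pointwise: the 14 patterns matching a window are exactly A's table for the third row's length
theorem patterns_count_eq_cnt3 (x y z : String) :
    ((pvPatterns.countP (fun p => pvCondP p x y z) : Nat) : Int) = pvCnt3 x y z := by
  have aux : ∀ n : Int, n = PySem.Str.len z →
      ((pvPatterns.countP (fun p => (n == p.1) && pvNZ x p.2.1 && pvNZ y p.2.2.1 && pvNZ z p.2.2.2) : Nat) : Int)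
        = (((pvTable n).countP (fun t => pvNZ x t.1 && pvNZ y t.2.1 && pvNZ z t.2.2) : Nat) : Int) := by
    intro n _
    by_cases h5 : n = 5
    · subst h5
      simp [pvPatterns, pvTable, List.countP_cons, Bool.and_assoc]
    · by_cases h6 : n = 6
      · subst h6
        simp [pvPatterns, pvTable, List.countP_cons, Bool.and_assoc]
      · by_cases h10 : n = 10
        · subst h10
          simp [pvPatterns, pvTable, List.countP_cons, Bool.and_assoc]
        · simp [pvPatterns, pvTable, h5, h6, h10]
  unfold pvCnt3 pvCondP
  exact aux (PySem.Str.len z) rfl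

-- the window sum over the zipped triples is pvTri
theorem sum_windows_tri (l : List String) :
    ((List.zip l (List.zip (l.drop 1) (l.drop 2))).map
      (fun w => pvCnt3 w.1 w.2.1 w.2.2)).sum = pvTri l := by
  induction l with
  | nil => simp [pvTri]
  | cons x t ih =>
    match t with
    | [] => simp [pvTri]
    | [y] => simp [pvTri]
    | y :: z :: r =>
      simp only [List.drop_succ_cons, List.drop_zero] at ih ⊢
      simp only [List.zip_cons_cons, List.map_cons, List.sum_cons]
      rw [ih]
      rfl

theorem all_valid_filter (array : List String) :
    ∀ r ∈ array.filter (fun r => pvValid r), pvValid r = true := by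
  intro r hr
  exact (List.mem_filter.mp hr).2

-- ===== VERDICT (by name: the statement is the Claim_ definition above) =====
theorem get_straight_red_twist_spec : Claim_equal_get_straight_red_twist := by
  intro array _ _
  unfold Spec_get_straight_red_twist get_straight_red_twist get_straight_red_twist_alt
  rw [foldl_filter_stepA, foldl_stepA_start _ 0 (all_valid_filter array), foldl_patterns]
  rw [show (fun w : String × String × String =>
      ((pvPatterns.countP (fun p => pvCondP p w.1 w.2.1 w.2.2) : Nat) : Int))
    = (fun w : String × String × String => pvCnt3 w.1 w.2.1 w.2.2) from by
    funext w; exact patterns_count_eq_cnt3 w.1 w.2.1 w.2.2]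
  rw [sum_windows_tri]
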